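-- pv_equiv track=rewrite | github.com/AnuragU03/RAZOR | backend/services/docs_pipeline.py | _group_into_modules
-- ===== SOURCE A (Python) =====
-- DOC_EXTENSIONS = {
--     ".py", ".js", ".ts", ".jsx", ".tsx", ".go", ".rs", ".java", ".rb",
--     ".c", ".cpp", ".h", ".hpp", ".cs", ".swift", ".kt", ".scala",
-- }
--
-- def _is_documentable(path: str) -> bool:
--     for ext in DOC_EXTENSIONS:
--         if path.endswith(ext):
--             return True
--     return False
--
-- def _group_into_modules(tree: list[dict]) -> dict[str, list[str]]:
--     modules = {}
--     for item in tree: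
--         if not _is_documentable(item["path"]):
--             continue
--         parts = item["path"].split("/")
--         if len(parts) == 1:
--             module_name = "root"
--         else:
--             module_name = parts[0]
--             if len(parts) > 2:
--                 module_name = "/".join(parts[:2])
--         if module_name not in modules:
--             modules[module_name] = []
--         modules[module_name].append(item["path"])
--     return modules
-- ===== SOURCE B (Python) =====
-- DOC_EXTENSIONS = {
--     ".py", ".js", ".ts", ".jsx", ".tsx", ".go", ".rs", ".java", ".rb",
--     ".c", ".cpp", ".h", ".hpp", ".cs", ".swift", ".kt", ".scala",
-- }
--
-- def _is_documentable(path: str) -> bool: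
--     return path.endswith(tuple(DOC_EXTENSIONS))
--
-- def _module_name(path: str) -> str:
--     parts = path.split("/")
--     if len(parts) == 1:
--         return "root"
--     return "/".join(parts[:2]) if len(parts) > 2 else parts[0]
--
-- def _group_into_modules(tree: list) -> dict:
--     pairs = [(_module_name(item["path"]), item["path"])
--              for item in tree if _is_documentable(item["path"])]
--     keys = dict.fromkeys(key for key, _ in pairs)
--     return {key: [p for k, p in pairs if k == key] for key in keys}
-- ===== Notes on version B (the rewrite author's own statement) =====
-- stated objective: alternative
-- what changed: Replaces A's incremental dict aggregation (membership test, conditional empty insert, in-place append per item) with a two-phase pass: first materialise the (module, path) pairs, then take the first-occurrence key order via dict.fromkeys and build each bucket by a comprehension filtering the pairs.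
import Mathlib
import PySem

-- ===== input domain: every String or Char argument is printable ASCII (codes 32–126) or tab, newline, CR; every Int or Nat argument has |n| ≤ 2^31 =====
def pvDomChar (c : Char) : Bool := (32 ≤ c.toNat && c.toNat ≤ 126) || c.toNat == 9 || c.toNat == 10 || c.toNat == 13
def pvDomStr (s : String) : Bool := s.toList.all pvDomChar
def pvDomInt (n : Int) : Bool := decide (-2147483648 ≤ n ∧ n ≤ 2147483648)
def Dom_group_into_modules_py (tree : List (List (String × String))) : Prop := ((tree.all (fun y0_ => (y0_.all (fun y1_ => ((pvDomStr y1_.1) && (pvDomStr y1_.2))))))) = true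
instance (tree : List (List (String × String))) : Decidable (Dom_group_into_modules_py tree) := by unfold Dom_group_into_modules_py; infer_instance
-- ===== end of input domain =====

-- B restates A's incremental dict grouping as: collect (module, path) pairs, dedup keys in
-- first-occurrence order, then build each bucket by filtering the pair list (same result, different decomposition).


-- ===== PORT A =====
def docExtensionsList : List String := [".py", ".js", ".ts", ".jsx", ".tsx", ".go", ".rs", ".java", ".rb",
  ".c", ".cpp", ".h", ".hpp", ".cs", ".swift", ".kt", ".scala"]

-- A iterates over the set DOC_EXTENSIONS with an early return; the boolean it computes is
-- order-independent, so iterating the element list with `any` is exact (PYSEM set rule: any over a set is exact).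
def isDocumentableA (path : String) : Bool :=
  docExtensionsList.any (fun ext => PySem.Str.endswith path ext)

-- item["path"] raises KeyError when absent; the total form getD "" is used and Pre_ excludes that case.
def group_into_modules_py (tree : List (List (String × String))) : List (String × List String) :=
  (tree.foldl (fun modules item =>
      let path := ((PySem.Dict.mk item).get? "path").getD ""
      if !(isDocumentableA path) then modules
      else
        let parts := (PySem.Str.split? path "/").getD []
        let module_name :=
          if parts.length == 1 then "root"
          else
            let module_name := PySem.List.pyGetD parts 0 ""
            if 2 < parts.length then PySem.Str.join "/" (PySem.List.slice parts none (some 2))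
            else module_name
        let modules := if modules.contains module_name then modules else modules.insert module_name []
        modules.modify module_name [] (fun v => v ++ [path]))
    PySem.Dict.empty).items

-- ===== PORT B =====
def isDocumentableB (path : String) : Bool :=
  docExtensionsList.any (fun ext => PySem.Str.endswith path ext)

def pathOfB (item : List (String × String)) : String :=
  ((PySem.Dict.mk item).get? "path").getD ""

def moduleNameB (path : String) : String :=
  let parts := (PySem.Str.split? path "/").getD []
  if parts.length == 1 then "root"
  else if 2 < parts.length then PySem.Str.join "/" (PySem.List.slice parts none (some 2))
  else PySem.List.pyGetD parts 0 ""

-- dict.fromkeys = PySem.List.dedup; the final dict comprehension ranges over DISTINCT keys,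
-- so it is exactly a map producing the association list.
def group_into_modules_py_alt (tree : List (List (String × String))) : List (String × List String) :=
  let pairs := (tree.filter (fun item => isDocumentableB (pathOfB item))).map
      (fun item => (moduleNameB (pathOfB item), pathOfB item))
  let keys := PySem.List.dedup (pairs.map (fun q => q.1))
  keys.map (fun key => (key, (pairs.filter (fun q => q.1 == key)).map (fun q => q.2)))

-- ===== PRECONDITION & SPEC =====
-- Pre_ excludes exactly the trees with an item lacking the "path" key, on which A raises KeyError.
def Pre_group_into_modules_py (tree : List (List (String × String))) : Prop :=
  ∀ item ∈ tree, "path" ∈ item.map Prod.fst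
instance (tree : List (List (String × String))) : Decidable (Pre_group_into_modules_py tree) := by
  unfold Pre_group_into_modules_py; infer_instance

def pvWitness_group_into_modules_py : (List (List (String × String))) :=
  [[("path", "src/a.py")], [("path", "b.js")]]

def Spec_group_into_modules_py (tree : List (List (String × String))) (out : List (String × List String)) : Prop := out = group_into_modules_py_alt tree
instance (tree : List (List (String × String))) (out : List (String × List String)) : Decidable (Spec_group_into_modules_py tree out) := by unfold Spec_group_into_modules_py; infer_instance

-- ===== CLAIM (what is proved, stated in full; the proofs are below) =====
def Claim_equal_group_into_modules_py : Prop := ∀ (tree : List (List (String × String))), Dom_group_into_modules_py tree → Pre_group_into_modules_py tree → Spec_group_into_modules_py tree (group_into_modules_py tree)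

-- ===== LEMMAS AND PROOFS =====

theorem insert_modify_fresh {d : PySem.Dict String (List String)} {k : String}
    (h : d.contains k = false) (f : List String → List String) :
    (d.insert k []).modify k [] f = d.modify k [] f := by
  have h0 : d.getD k [] = [] := PySem.Dict.getD_of_not_contains d [] h
  simp [PySem.Dict.modify, PySem.Dict.getD_insert_self, PySem.Dict.insert_insert_self, h0]

theorem foldl_fuse (tree : List (List (String × String))) :
    ∀ (d : PySem.Dict String (List String)),
    tree.foldl (fun modules item =>
      let path := ((PySem.Dict.mk item).get? "path").getD ""
      if !(isDocumentableA path) then modules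
      else
        let parts := (PySem.Str.split? path "/").getD []
        let module_name :=
          if parts.length == 1 then "root"
          else
            let module_name := PySem.List.pyGetD parts 0 ""
            if 2 < parts.length then PySem.Str.join "/" (PySem.List.slice parts none (some 2))
            else module_name
        let modules := if modules.contains module_name then modules else modules.insert module_name []
        modules.modify module_name [] (fun v => v ++ [path])) d
    = ((tree.filter (fun item => isDocumentableB (pathOfB item))).map
        (fun item => (moduleNameB (pathOfB item), pathOfB item))).foldl
        (fun d q => d.modify q.1 [] (fun v => v ++ [q.2])) d := by
  induction tree with
  | nil => intro d; rfl
  | cons item rest ih =>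
    intro d
    rw [List.foldl_cons, ih, List.filter_cons]
    by_cases hdoc : isDocumentableB (pathOfB item) = true
    · simp only [hdoc, if_pos, List.map_cons, List.foldl_cons]
      congr 1
      show (let path := pathOfB item
        if !(isDocumentableA path) then d
        else
          let parts := (PySem.Str.split? path "/").getD []
          let module_name :=
            if parts.length == 1 then "root"
            else
              let module_name := PySem.List.pyGetD parts 0 ""
              if 2 < parts.length then PySem.Str.join "/" (PySem.List.slice parts none (some 2))
              else module_name
          let modules := if d.contains module_name then d else d.insert module_name []
          modules.modify module_name [] (fun v => v ++ [path]))
        = d.modify (moduleNameB (pathOfB item)) [] (fun v => v ++ [pathOfB item])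
      have hA : isDocumentableA (pathOfB item) = true := hdoc
      simp only [hA, Bool.not_true, if_neg, Bool.false_eq_true, not_false_iff]
      have hm : (let parts := (PySem.Str.split? (pathOfB item) "/").getD []
          if parts.length == 1 then "root"
          else
            let module_name := PySem.List.pyGetD parts 0 ""
            if 2 < parts.length then PySem.Str.join "/" (PySem.List.slice parts none (some 2))
            else module_name) = moduleNameB (pathOfB item) := by
        unfold moduleNameB
        by_cases h1 : ((PySem.Str.split? (pathOfB item) "/").getD []).length == 1 <;> simp [h1]
      rw [hm]
      by_cases hc : d.contains (moduleNameB (pathOfB item)) = true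
      · simp [hc]
      · simp only [Bool.not_eq_true] at hc
        simp [hc, insert_modify_fresh hc]
    · simp only [Bool.not_eq_true] at hdoc
      simp only [hdoc, Bool.false_eq_true, if_neg, not_false_iff]
      congr 1
      have hA : isDocumentableA (pathOfB item) = false := hdoc
      show (let path := pathOfB item
        if !(isDocumentableA path) then d else _) = d
      simp [hA]

theorem items_group (pairs : List (String × String)) :
    (pairs.foldl (fun d q => d.modify q.1 [] (fun v => v ++ [q.2]))
      (PySem.Dict.empty : PySem.Dict String (List String))).items
    = (PySem.List.dedup (pairs.map (fun q => q.1))).map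
        (fun key => (key, (pairs.filter (fun q => q.1 == key)).map (fun q => q.2))) := by
  have hnd : (pairs.foldl (fun d q => d.modify q.1 [] (fun v => v ++ [q.2]))
      (PySem.Dict.empty : PySem.Dict String (List String))).keys.Nodup := by
    exact PySem.Dict.nodup_keys_foldl_modify_key pairs Prod.fst [] (fun d q => (fun v => v ++ [q.2])) _ (by simp)
  rw [PySem.Dict.items_eq_map_keys _ hnd []]
  have hk : (pairs.foldl (fun d q => d.modify q.1 [] (fun v => v ++ [q.2]))
      (PySem.Dict.empty : PySem.Dict String (List String))).keys
      = PySem.List.dedup (pairs.map (fun q => q.1)) := by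
    rw [PySem.Dict.keys_foldl_modify_key, PySem.List.dedup_eq_ofList]
    rfl
  rw [hk]
  apply List.map_congr_left
  intro k hkmem
  simp only [Prod.mk.injEq, true_and]
  rw [PySem.Dict.getD_foldl_modify_append]
  simp [PySem.Dict.getD_empty]

-- ===== VERDICT (by name: the statement is the Claim_ definition above) =====
theorem group_into_modules_py_spec : Claim_equal_group_into_modules_py := by
  intro tree _ _
  unfold Spec_group_into_modules_py group_into_modules_py group_into_modules_py_alt
  rw [foldl_fuse, items_group]
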